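-- pv_equiv track=rewrite | github.com/NewbieAuntieCodes/movies-react-app | fastapi-backend/routers/watch_status.py | extract_director_cast_tv
-- ===== SOURCE A (Python) =====
-- def extract_director_cast_tv(credits: dict) -> tuple[str, str]:
--     """专门为电视剧提取导演和主演信息"""
--     director = "暂无导演信息"
--     cast = "暂无主演信息"
--
--     if credits and "crew" in credits:
--         # 电视剧中查找制作人、导演、创作者等
--         priority_jobs = ['Creator', 'Showrunner', 'Executive Producer', 'Director']
--         directors = []
--
--         for job in priority_jobs:
--             job_people = [person for person in credits['crew'] if person.get('job') == job]
--             if job_people: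
--                 directors.extend(job_people[:2])
--                 if len(directors) >= 2:
--                     break
--
--         if directors:
--             director_names = [person.get('name', '') for person in directors if person.get('name')]
--             director = ', '.join(director_names[:2])
--
--     # 提取主演（前5位）
--     if credits and 'cast' in credits and credits['cast']:
--         main_cast = credits['cast'][:5]
--         cast_list = [person.get('name', '') for person in main_cast if person.get('name')]
--         cast = ', '.join(cast_list) if cast_list else "暂无主演信息"
--
--     return director, cast
-- ===== SOURCE B (Python) =====
-- def _bump(group, person):
--     """append person to group unless the group already holds two people"""
--     return group if len(group) >= 2 else group + [person]
--
--
-- def extract_director_cast_tv(credits: dict) -> tuple[str, str]: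
--     """One capped-bucket pass over the crew (no per-job rescans, no break loop)."""
--     director = "暂无导演信息"
--     cast = "暂无主演信息"
--
--     if credits and "crew" in credits:
--         creators, showrunners, producers, helmers = [], [], [], []
--         for person in credits["crew"]:
--             job = person.get("job")
--             if job == "Creator":
--                 creators = _bump(creators, person)
--             elif job == "Showrunner":
--                 showrunners = _bump(showrunners, person)
--             elif job == "Executive Producer":
--                 producers = _bump(producers, person)
--             elif job == "Director":
--                 helmers = _bump(helmers, person)
--         groups = [g for g in (creators, showrunners, producers, helmers) if g]
--         if groups:
--             chosen = groups[0] if len(groups[0]) >= 2 or len(groups) == 1 else groups[0] + groups[1]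
--             names = [p.get("name", "") for p in chosen if p.get("name")]
--             director = ", ".join(names[:2])
--
--     if credits and "cast" in credits and credits["cast"]:
--         names = [p.get("name", "") for p in credits["cast"][:5] if p.get("name")]
--         cast = ", ".join(names) if names else "暂无主演信息"
--
--     return director, cast
-- ===== Notes on version B (the rewrite author's own statement) =====
-- stated objective: alternative
-- what changed: B scans the crew exactly once, routing each person into one of four capped buckets (at most two kept per priority job), then picks the director group by a closed-form choice among the nonempty buckets (first bucket, plus the second nonempty one only if the first holds a single person), instead of A's loop that re-filters the whole crew for every priority job and breaks once two people are collected.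
import Mathlib
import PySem

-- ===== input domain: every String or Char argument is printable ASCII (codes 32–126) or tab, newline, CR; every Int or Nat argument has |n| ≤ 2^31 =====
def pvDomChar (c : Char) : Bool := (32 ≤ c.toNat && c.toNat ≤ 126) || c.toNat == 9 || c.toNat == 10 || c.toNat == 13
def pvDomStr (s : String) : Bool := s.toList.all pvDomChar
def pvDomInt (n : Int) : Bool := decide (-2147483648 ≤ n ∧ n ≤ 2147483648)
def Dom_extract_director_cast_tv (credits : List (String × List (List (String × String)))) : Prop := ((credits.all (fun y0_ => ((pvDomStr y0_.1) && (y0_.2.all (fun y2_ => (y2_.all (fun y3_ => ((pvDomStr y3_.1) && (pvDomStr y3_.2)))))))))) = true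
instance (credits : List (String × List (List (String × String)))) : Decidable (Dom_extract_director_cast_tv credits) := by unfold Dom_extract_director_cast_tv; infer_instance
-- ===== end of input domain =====

-- B replaces A's per-job rescans of the crew with a single capped-bucket pass (at most
-- two people kept per priority job) and a closed-form choice among the nonempty buckets
-- instead of A's extend-and-break loop (objective: alternative decomposition).

-- shared field accessors (person.get('job') / truthiness of person.get('name') / person.get('name',''))
def pvJob (p : List (String × String)) : Option String := (PySem.Dict.mk p).get? "job"
def pvHasName (p : List (String × String)) : Bool := (PySem.Dict.mk p).getD "name" "" != ""
def pvNameD (p : List (String × String)) : String := (PySem.Dict.mk p).getD "name" ""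

-- ===== PORT A =====
-- the 'for job in priority_jobs' loop with its break, scanning the crew per job
def aLoop (crew : List (List (String × String))) :
    List String → List (List (String × String)) → List (List (String × String))
  | [], directors => directors
  | job :: rest, directors =>
    let job_people := crew.filter (fun p => pvJob p == some job)
    if job_people ≠ [] then
      let directors' := directors ++ PySem.List.slice job_people none (some 2)
      if 2 ≤ directors'.length then directors' else aLoop crew rest directors'
    else aLoop crew rest directors

def extract_director_cast_tv (credits : List (String × List (List (String × String)))) : String × String :=
  let d := PySem.Dict.mk credits
  let director₀ := "暂无导演信息"
  let cast₀ := "暂无主演信息"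
  let director :=
    if credits ≠ [] ∧ d.contains "crew" then
      let crew := d.getD "crew" []      -- credits['crew']; present by the guard, so getD is exact
      let directors := aLoop crew ["Creator", "Showrunner", "Executive Producer", "Director"] []
      if directors ≠ [] then
        PySem.Str.join ", " (PySem.List.slice ((directors.filter (fun p => pvHasName p)).map pvNameD) none (some 2))
      else director₀
    else director₀
  let cast :=
    if credits ≠ [] ∧ d.contains "cast" ∧ d.getD "cast" [] ≠ [] then
      let main_cast := PySem.List.slice (d.getD "cast" []) none (some 5)
      let cast_list := (main_cast.filter (fun p => pvHasName p)).map pvNameD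
      if cast_list ≠ [] then PySem.Str.join ", " cast_list else "暂无主演信息"
    else cast₀
  (director, cast)

-- ===== PORT B =====
-- _bump: append unless the bucket already holds two people
def bump (g : List (List (String × String))) (p : List (String × String)) :
    List (List (String × String)) :=
  if 2 ≤ g.length then g else g ++ [p]

-- one step of the pass: route the person to its job's bucket
def bStep (s : List (List (String × String)) × List (List (String × String)) ×
    List (List (String × String)) × List (List (String × String)))
    (p : List (String × String)) :
    List (List (String × String)) × List (List (String × String)) ×
    List (List (String × String)) × List (List (String × String)) :=
  let job := pvJob p
  if job == some "Creator" then (bump s.1 p, s.2.1, s.2.2.1, s.2.2.2)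
  else if job == some "Showrunner" then (s.1, bump s.2.1 p, s.2.2.1, s.2.2.2)
  else if job == some "Executive Producer" then (s.1, s.2.1, bump s.2.2.1 p, s.2.2.2)
  else if job == some "Director" then (s.1, s.2.1, s.2.2.1, bump s.2.2.2 p)
  else s

-- the single pass over the crew, carrying the four capped buckets
def bPass (crew : List (List (String × String))) :
    List (List (String × String)) × List (List (String × String)) ×
    List (List (String × String)) × List (List (String × String)) :=
  crew.foldl bStep ([], [], [], [])

def extract_director_cast_tv_alt (credits : List (String × List (List (String × String)))) : String × String :=
  let d := PySem.Dict.mk credits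
  let director :=
    if credits ≠ [] ∧ d.contains "crew" then
      let s := bPass (d.getD "crew" [])
      let groups := [s.1, s.2.1, s.2.2.1, s.2.2.2].filter (fun g => g ≠ [])
      match groups with
      | [] => "暂无导演信息"
      | g0 :: rest =>
        let chosen := if 2 ≤ g0.length ∨ rest = [] then g0 else g0 ++ rest.headD []
        let names := (chosen.filter (fun p => pvHasName p)).map pvNameD
        PySem.Str.join ", " (PySem.List.slice names none (some 2))
    else "暂无导演信息"
  let cast :=
    if credits ≠ [] ∧ d.contains "cast" ∧ d.getD "cast" [] ≠ [] then
      let names := ((PySem.List.slice (d.getD "cast" []) none (some 5)).filter (fun p => pvHasName p)).map pvNameD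
      if names ≠ [] then PySem.Str.join ", " names else "暂无主演信息"
    else "暂无主演信息"
  (director, cast)

-- ===== PRECONDITION & SPEC =====
def Spec_extract_director_cast_tv (credits : List (String × List (List (String × String)))) (out : String × String) : Prop := out = extract_director_cast_tv_alt credits
instance (credits : List (String × List (List (String × String)))) (out : String × String) : Decidable (Spec_extract_director_cast_tv credits out) := by unfold Spec_extract_director_cast_tv; infer_instance

-- ===== CLAIM (what is proved, stated in full; the proofs are below) =====
def Claim_equal_extract_director_cast_tv : Prop := ∀ (credits : List (String × List (List (String × String)))), Dom_extract_director_cast_tv credits → Spec_extract_director_cast_tv credits (extract_director_cast_tv credits)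

-- ===== LEMMAS AND PROOFS =====

-- A's loop expressed on the list of per-job capped groups (proof vehicle only)
def gLoop : List (List (List (String × String))) → List (List (String × String)) → List (List (String × String))
  | [], acc => acc
  | t :: rest, acc =>
    if t ≠ [] then
      let acc' := acc ++ t
      if 2 ≤ acc'.length then acc' else gLoop rest acc'
    else gLoop rest acc

-- A's loop only depends on each job's capped filter
theorem aLoop_eq_gLoop (crew : List (List (String × String))) (jobs : List String)
    (acc : List (List (String × String))) :
    aLoop crew jobs acc
      = gLoop (jobs.map (fun j => (crew.filter (fun p => pvJob p == some j)).take 2)) acc := by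
  induction jobs generalizing acc with
  | nil => rfl
  | cons job rest ih =>
    simp only [aLoop, gLoop, List.map_cons]
    have hs : PySem.List.slice (crew.filter (fun p => pvJob p == some job)) none (some 2)
        = (crew.filter (fun p => pvJob p == some job)).take 2 := by
      have := PySem.List.slice_to_natCast (crew.filter (fun p => pvJob p == some job)) 2
      simpa using this
    have he : ((crew.filter (fun p => pvJob p == some job)).take 2 ≠ [])
        ↔ (crew.filter (fun p => pvJob p == some job) ≠ []) := by
      simp [List.take_eq_nil_iff]
    by_cases h : crew.filter (fun p => pvJob p == some job) = []
    · simp [h, ih]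
    · simp only [hs, if_pos h, if_pos (he.mpr h)]
      split_ifs with h2
      · rfl
      · exact ih _

-- once one person is held, the next nonempty group ends the loop
theorem gLoop_one (ts : List (List (List (String × String)))) (acc : List (List (String × String)))
    (h : acc.length = 1) :
    gLoop ts acc = acc ++ (ts.filter (fun g => g ≠ [])).headD [] := by
  induction ts with
  | nil => simp [gLoop]
  | cons t rest ih =>
    by_cases ht : t = []
    · simp [gLoop, ht, ih]
    · have h2 : 2 ≤ (acc ++ t).length := by
        have := List.length_pos_iff.mpr ht
        simp [h]; omega
      simp only [gLoop, ne_eq, ht, not_false_eq_true, if_true, if_pos h2]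
      rw [List.filter_cons_of_pos (p := fun g => decide (g ≠ [])) (by simp [ht])]
      simp

-- the closed form of A's extend-and-break loop over capped groups
theorem gLoop_closed (ts : List (List (List (String × String))))
    (hcap : ∀ t ∈ ts, t.length ≤ 2) :
    gLoop ts []
      = match ts.filter (fun g => g ≠ []) with
        | [] => []
        | g0 :: rest => if 2 ≤ g0.length ∨ rest = [] then g0 else g0 ++ rest.headD [] := by
  induction ts with
  | nil => rfl
  | cons t rest ih =>
    by_cases ht : t = []
    · simpa [gLoop, ht] using ih (fun x hx => hcap x (List.mem_cons_of_mem _ hx))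
    · have hlen : 1 ≤ t.length := List.length_pos_iff.mpr ht
      have hcapt : t.length ≤ 2 := hcap t List.mem_cons_self
      rw [List.filter_cons_of_pos (p := fun g => decide (g ≠ [])) (by simp [ht])]
      by_cases h2 : 2 ≤ t.length
      · have hl : 2 ≤ (([] : List (List (String × String))) ++ t).length := by simpa using h2
        simp only [gLoop, ne_eq, ht, not_false_eq_true, if_true, if_pos hl]
        simp [h2]
      · have h1 : t.length = 1 := by omega
        have hred : gLoop (t :: rest) [] = gLoop rest t := by
          simp [gLoop, ht, h1]
        rw [hred, gLoop_one rest t h1]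
        simp [h2]
        intro hall
        have hnone : List.find? (fun g => !decide (g = [])) rest = none := by
          apply List.find?_eq_none.mpr
          intro x hx
          simp [hall x hx]
        simp [hnone]

-- folding _bump over a single job's people takes what still fits in the bucket
theorem foldl_bump (l : List (List (String × String))) (a : List (List (String × String))) :
    l.foldl bump a = a ++ l.take (2 - a.length) := by
  induction l generalizing a with
  | nil => simp
  | cons x xs ih =>
    by_cases h : 2 ≤ a.length
    · have h0 : 2 - a.length = 0 := by omega
      simp only [List.foldl_cons, bump, if_pos h, ih, h0]
      simp
    · have h1 : 2 - a.length = (2 - (a.length + 1)) + 1 := by omega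
      simp only [List.foldl_cons, bump, if_neg h, ih]
      simp [h1, List.take_succ_cons]

-- the pass routes each person to its own bucket: the fold splits into four bucket folds
theorem bPass_fold (crew : List (List (String × String)))
    (a b c d : List (List (String × String))) :
    crew.foldl bStep (a, b, c, d)
      = ((crew.filter (fun p => pvJob p == some "Creator")).foldl bump a,
         (crew.filter (fun p => pvJob p == some "Showrunner")).foldl bump b,
         (crew.filter (fun p => pvJob p == some "Executive Producer")).foldl bump c,
         (crew.filter (fun p => pvJob p == some "Director")).foldl bump d) := by
  induction crew generalizing a b c d with
  | nil => simp
  | cons p rest ih =>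
    simp only [List.foldl_cons, bStep]
    by_cases hc : pvJob p == some "Creator"
    · simp [hc, ih,
        show ¬(pvJob p == some "Showrunner") = true by simp_all,
        show ¬(pvJob p == some "Executive Producer") = true by simp_all,
        show ¬(pvJob p == some "Director") = true by simp_all]
    · by_cases hs : pvJob p == some "Showrunner"
      · simp [hc, hs, ih,
          show ¬(pvJob p == some "Executive Producer") = true by simp_all,
          show ¬(pvJob p == some "Director") = true by simp_all]
      · by_cases he : pvJob p == some "Executive Producer"
        · simp [hc, hs, he, ih,
            show ¬(pvJob p == some "Director") = true by simp_all]
        · by_cases hd : pvJob p == some "Director"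
          · simp [hc, hs, he, hd, ih]
          · simp [hc, hs, he, hd, ih]

-- the single capped-bucket pass computes each job's capped filter
theorem bPass_eq (crew : List (List (String × String))) :
    bPass crew
      = ((crew.filter (fun p => pvJob p == some "Creator")).take 2,
         (crew.filter (fun p => pvJob p == some "Showrunner")).take 2,
         (crew.filter (fun p => pvJob p == some "Executive Producer")).take 2,
         (crew.filter (fun p => pvJob p == some "Director")).take 2) := by
  unfold bPass
  rw [bPass_fold]
  simp [foldl_bump]

-- ===== VERDICT (by name: the statement is the Claim_ definition above) =====
theorem extract_director_cast_tv_spec : Claim_equal_extract_director_cast_tv := by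
  intro credits _
  unfold Spec_extract_director_cast_tv
  unfold extract_director_cast_tv extract_director_cast_tv_alt
  simp only [Prod.mk.injEq]
  refine ⟨?_, ?_⟩
  · by_cases hg : credits ≠ [] ∧ ({ items := credits } : PySem.Dict String (List (List (String × String)))).contains "crew" = true
    · rw [if_pos hg, if_pos hg]
      set crew := ({ items := credits } : PySem.Dict String (List (List (String × String)))).getD "crew" [] with hc
      rw [aLoop_eq_gLoop, bPass_eq]
      simp only [List.map_cons, List.map_nil]
      rw [gLoop_closed _ (by
        intro t ht
        simp only [List.mem_cons, List.not_mem_nil, or_false] at ht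
        rcases ht with h | h | h | h <;> (subst h; exact List.length_take_le _ _))]
      cases hfe : List.filter (fun g => decide (g ≠ []))
          [(crew.filter (fun p => pvJob p == some "Creator")).take 2,
           (crew.filter (fun p => pvJob p == some "Showrunner")).take 2,
           (crew.filter (fun p => pvJob p == some "Executive Producer")).take 2,
           (crew.filter (fun p => pvJob p == some "Director")).take 2] with
      | nil => simp
      | cons g0 rest =>
        have hg0 : g0 ≠ [] := by
          have hmem : g0 ∈ List.filter (fun g => decide (g ≠ []))
              [(crew.filter (fun p => pvJob p == some "Creator")).take 2,
               (crew.filter (fun p => pvJob p == some "Showrunner")).take 2,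
               (crew.filter (fun p => pvJob p == some "Executive Producer")).take 2,
               (crew.filter (fun p => pvJob p == some "Director")).take 2] := by
            rw [hfe]; exact List.mem_cons_self
          simpa using (List.of_mem_filter hmem)
        have hch : (if 2 ≤ g0.length ∨ rest = [] then g0 else g0 ++ rest.headD []) ≠ [] := by
          split_ifs with h
          · exact hg0
          · simp [hg0]
        simp
        intro hc0
        exact absurd hc0 (by simpa using hch)
    · rw [if_neg hg, if_neg hg]
  · trivial
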